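-- pv_equiv track=rewrite | github.com/yuxin101/skills | skills/alfredjamesli/gui-claw/scripts/spreadsheet_utils.py | _estimate_cell_height
-- ===== SOURCE A (Python) =====
-- def _estimate_cell_height(ocr_results, row_num):
--     """Estimate cell height from adjacent row numbers."""
--     rows = {}
--     for text, x, y, w, h in ocr_results:
--         clean = text.strip()
--         if x < 100 and clean.isdigit():
--             rows[int(clean)] = y + h // 2
--
--     if row_num in rows:
--         if row_num + 1 in rows:
--             return rows[row_num + 1] - rows[row_num]
--         if row_num - 1 in rows:
--             return rows[row_num] - rows[row_num - 1]
--
--     return 21  # default cell height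
-- ===== SOURCE B (Python) =====
-- def _estimate_cell_height(ocr_results, row_num):
--     """Estimate cell height from adjacent row numbers.
--
--     Instead of building a table of all digit-row centers, search backwards
--     for the specific row labels needed, stopping at the first (= latest) match.
--     """
--     def center(k):
--         for text, x, y, w, h in reversed(ocr_results):
--             clean = text.strip()
--             if x < 100 and clean.isdigit() and int(clean) == k:
--                 return y + h // 2
--         return None
--
--     c_at = center(row_num)
--     if c_at is not None:
--         c_next = center(row_num + 1)
--         if c_next is not None:
--             return c_next - c_at
--         c_prev = center(row_num - 1)
--         if c_prev is not None:
--             return c_at - c_prev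
--     return 21
-- ===== Notes on version B (the rewrite author's own statement) =====
-- stated objective: alternative
-- what changed: B builds no dict at all: it performs demand-driven backward scans with early exit, one per needed row label (row_num, then row_num+1/row_num-1 only if required), the first match in the reversed list reproducing the dict's last-write-wins.
import Mathlib
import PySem

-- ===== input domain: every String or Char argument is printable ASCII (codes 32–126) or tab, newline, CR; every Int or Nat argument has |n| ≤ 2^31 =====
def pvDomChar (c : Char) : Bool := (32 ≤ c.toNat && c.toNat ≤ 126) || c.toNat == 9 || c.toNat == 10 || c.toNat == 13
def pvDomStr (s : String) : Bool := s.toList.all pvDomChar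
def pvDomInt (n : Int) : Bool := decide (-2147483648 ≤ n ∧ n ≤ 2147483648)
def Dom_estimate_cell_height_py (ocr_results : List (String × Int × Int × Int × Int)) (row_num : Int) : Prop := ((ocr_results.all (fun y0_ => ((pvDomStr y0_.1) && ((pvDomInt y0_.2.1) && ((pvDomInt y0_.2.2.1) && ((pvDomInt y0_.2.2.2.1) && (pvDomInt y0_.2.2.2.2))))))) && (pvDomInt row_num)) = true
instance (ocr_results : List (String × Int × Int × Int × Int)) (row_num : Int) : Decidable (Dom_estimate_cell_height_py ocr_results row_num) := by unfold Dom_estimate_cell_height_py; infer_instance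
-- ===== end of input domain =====

-- B replaces A's dict-building pass by demand-driven backward scans with early exit (alternative decomposition; same cost).

-- ===== PORT A =====
-- the per-row center value y + h // 2 (Python floor division)
def pvCenter (y h : Int) : Int := y + PySem.Int.floordiv h 2

def estimate_cell_height_py (ocr_results : List (String × Int × Int × Int × Int)) (row_num : Int) : Int :=
  let rows : PySem.Dict Int Int :=
    ocr_results.foldl (fun d t =>
      let clean := PySem.Str.strip t.1
      if t.2.1 < 100 ∧ PySem.Str.strIsdigit clean then
        -- clean.isdigit() guarantees int(clean) succeeds; getD 0 is unreachable
        d.insert ((PySem.Int.ofStr? clean).getD 0) (pvCenter t.2.2.1 t.2.2.2.2)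
      else d) PySem.Dict.empty
  if rows.contains row_num then
    if rows.contains (row_num + 1) then rows.getD (row_num + 1) 0 - rows.getD row_num 0
    else if rows.contains (row_num - 1) then rows.getD row_num 0 - rows.getD (row_num - 1) 0
    else 21
  else 21

-- ===== PORT B =====
-- B's inner `center(k)`: first matching entry of the (already reversed) list, early exit
def pvFindCenter (l : List (String × Int × Int × Int × Int)) (k : Int) : Option Int :=
  match l with
  | [] => none
  | t :: rest =>
    let clean := PySem.Str.strip t.1
    if t.2.1 < 100 ∧ PySem.Str.strIsdigit clean ∧ (PySem.Int.ofStr? clean).getD 0 = k then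
      some (pvCenter t.2.2.1 t.2.2.2.2)
    else pvFindCenter rest k

def estimate_cell_height_py_alt (ocr_results : List (String × Int × Int × Int × Int)) (row_num : Int) : Int :=
  match pvFindCenter ocr_results.reverse row_num with
  | none => 21
  | some cAt =>
    match pvFindCenter ocr_results.reverse (row_num + 1) with
    | some cNext => cNext - cAt
    | none =>
      match pvFindCenter ocr_results.reverse (row_num - 1) with
      | some cPrev => cAt - cPrev
      | none => 21

-- ===== PRECONDITION & SPEC =====
def Spec_estimate_cell_height_py (ocr_results : List (String × Int × Int × Int × Int)) (row_num : Int) (out : Int) : Prop := out = estimate_cell_height_py_alt ocr_results row_num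
instance (ocr_results : List (String × Int × Int × Int × Int)) (row_num : Int) (out : Int) : Decidable (Spec_estimate_cell_height_py ocr_results row_num out) := by unfold Spec_estimate_cell_height_py; infer_instance

-- ===== CLAIM (what is proved, stated in full; the proofs are below) =====
def Claim_equal_estimate_cell_height_py : Prop := ∀ (ocr_results : List (String × Int × Int × Int × Int)) (row_num : Int), Dom_estimate_cell_height_py ocr_results row_num → Spec_estimate_cell_height_py ocr_results row_num (estimate_cell_height_py ocr_results row_num)

-- ===== LEMMAS AND PROOFS =====
theorem pv_find_append (a b : List (String × Int × Int × Int × Int)) (k : Int) :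
    pvFindCenter (a ++ b) k = (pvFindCenter a k).orElse (fun _ => pvFindCenter b k) := by
  induction a with
  | nil => simp [pvFindCenter]
  | cons t rest ih =>
    simp only [List.cons_append, pvFindCenter]
    split <;> simp [ih]

-- A's dict, looked up at k, is B's first-match-in-reverse search (with d as leftover)
theorem pv_step_get? (d : PySem.Dict Int Int) (t : String × Int × Int × Int × Int) (k : Int) :
    ((let clean := PySem.Str.strip t.1
      if t.2.1 < 100 ∧ PySem.Str.strIsdigit clean then
        d.insert ((PySem.Int.ofStr? clean).getD 0) (pvCenter t.2.2.1 t.2.2.2.2)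
      else d) : PySem.Dict Int Int).get? k
    = (pvFindCenter [t] k).orElse (fun _ => d.get? k) := by
  simp only [pvFindCenter]
  split_ifs with h1 h2 h3
  · rw [PySem.Dict.get?_insert]
    simp [h2.2.2, Option.orElse]
  · rw [PySem.Dict.get?_insert]
    have hne : ¬ (k = (PySem.Int.ofStr? (PySem.Str.strip t.1)).getD 0) := by
      intro h; exact h2 ⟨h1.1, h1.2, h.symm⟩
    simp [hne, Option.orElse]
  · exact absurd ⟨h3.1, h3.2.1⟩ h1
  · simp [Option.orElse]

-- A's dict, looked up at k, is B's first-match-in-reverse search (with d as leftover)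
theorem pv_fold_get? (l : List (String × Int × Int × Int × Int)) (d : PySem.Dict Int Int) (k : Int) :
    (l.foldl (fun d t =>
      let clean := PySem.Str.strip t.1
      if t.2.1 < 100 ∧ PySem.Str.strIsdigit clean then
        d.insert ((PySem.Int.ofStr? clean).getD 0) (pvCenter t.2.2.1 t.2.2.2.2)
      else d) d).get? k
    = (pvFindCenter l.reverse k).orElse (fun _ => d.get? k) := by
  induction l generalizing d with
  | nil => simp [pvFindCenter]
  | cons t rest ih =>
    simp only [List.foldl_cons, List.reverse_cons, pv_find_append, ih, pv_step_get?]
    rcases pvFindCenter rest.reverse k with _ | v <;> simp [Option.orElse]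

theorem pv_orElse_empty (o : Option Int) (k : Int) :
    (o.orElse fun _ => (PySem.Dict.empty : PySem.Dict Int Int).get? k) = o := by
  rcases o <;> simp [PySem.Dict.empty, PySem.Dict.get?, Option.orElse]

-- ===== VERDICT (by name: the statement is the Claim_ definition above) =====
theorem estimate_cell_height_py_spec : Claim_equal_estimate_cell_height_py := by
  intro ocr_results row_num _
  unfold Spec_estimate_cell_height_py estimate_cell_height_py estimate_cell_height_py_alt
  simp only [PySem.Dict.contains_eq_isSome_get?, PySem.Dict.getD_eq_get?_getD, pv_fold_get?,
    pv_orElse_empty]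
  rcases h0 : pvFindCenter ocr_results.reverse row_num with _ | c0 <;>
    rcases h1 : pvFindCenter ocr_results.reverse (row_num + 1) with _ | c1 <;>
      rcases h2 : pvFindCenter ocr_results.reverse (row_num - 1) with _ | c2 <;>
        simp
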